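-- pv_equiv track=rewrite | github.com/Purefekt/leetcode | 224. Basic Calculator/stack.py | calculate
-- ===== SOURCE A (Python) =====
-- def calculate(s: str) -> int:
--
--     # identify individual numbers and remove wwhitespaces
--     this_num = ""
--     new_s = []
--     for c in s:
--         if c == '-' or c == '+' or c == ' ' or c=='(' or c==')':
--             if c == ' ':
--                 continue
--             if this_num:
--                 new_s.append(int(this_num))
--             new_s.append(c)
--             this_num = ''
--         else:
--             this_num += c
--     if this_num:
--         new_s.append(int(this_num))
--
--     stack = []
--     for c in new_s:
--         if c == ')':
--             eq = []
--             while stack[-1] != '(':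
--                 top = stack.pop()
--                 eq.append(top)
--             eq = eq[::-1]
--             # add leading + if the first element is positive
--             if eq[0] != '-':
--                 eq.insert(0, '+')
--             # get result by adding/sub all numbers
--             result = 0
--             for i in range(0, len(eq), 2):
--                 if eq[i] == '+':
--                     result += eq[i+1]
--                 else:
--                     result -= eq[i+1]
--             # remove the open bracket
--             stack.pop()
--             # add result back to the stack
--             stack.append(result)
--         else:
--             stack.append(c)
--
--     # simply evaluate this stack
--     if stack[0] != '-':
--         stack.insert(0, '+')
--
--     result = 0
--     for i in range(0, len(stack), 2):
--         if stack[i] == '+':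
--             result += stack[i+1]
--         else:
--             result -= stack[i+1]
--
--     return result
-- ===== SOURCE B (Python) =====
-- def calculate(s: str) -> int:
--     # standard single-pass evaluator with a sign stack (LeetCode 224 classic)
--     result, sign, num = 0, 1, 0
--     stack = []
--     for c in s:
--         if c.isdigit():
--             num = num * 10 + int(c)
--         elif c == '+':
--             result += sign * num
--             num, sign = 0, 1
--         elif c == '-':
--             result += sign * num
--             num, sign = 0, -1
--         elif c == '(':
--             stack.append((result, sign))
--             result, sign = 0, 1
--         elif c == ')':
--             result += sign * num
--             num = 0
--             prev, psign = stack.pop()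
--             result = prev + psign * result
--         elif c != ' ':
--             raise ValueError(f"unexpected character {c!r}")
--     return result + sign * num
-- ===== Notes on version B (the rewrite author's own statement) =====
-- stated objective: idiomatic
-- what changed: Replaces A's two-phase evaluator (tokenize into a list, then a token stack that on each closing parenthesis pops tokens back to the matching open parenthesis, reverses them, inserts a leading plus sign and re-scans that segment pairwise, plus a final pair-scan of the whole stack) by the standard single left-to-right pass that folds each number eagerly into a running result with a current sign and pushes/pops result-sign pairs at parentheses.
-- outside the precondition, e.g. on calculate('2(44+3'): A returns -39, B returns 247; on calculate('1_2'): A returns 12, B raises ValueError; on calculate('\t5'): A returns 5, B raises ValueError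
import Mathlib
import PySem

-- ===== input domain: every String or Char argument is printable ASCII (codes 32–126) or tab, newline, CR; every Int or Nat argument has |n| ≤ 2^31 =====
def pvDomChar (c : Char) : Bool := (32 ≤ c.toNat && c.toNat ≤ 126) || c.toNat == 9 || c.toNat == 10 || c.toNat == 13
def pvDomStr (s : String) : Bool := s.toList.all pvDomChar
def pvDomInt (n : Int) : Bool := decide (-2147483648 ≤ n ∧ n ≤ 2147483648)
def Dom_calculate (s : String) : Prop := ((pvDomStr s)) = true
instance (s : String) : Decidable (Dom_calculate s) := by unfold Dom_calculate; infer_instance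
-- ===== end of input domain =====

-- B replaces A's two-phase tokenize-then-stack-collapse evaluator by the standard
-- single-pass sign-stack evaluator (idiomatic LeetCode-224 solution); return values agree on Pre_.

-- ===== PORT A =====

-- Python keeps a heterogeneous list of ints and 1-char strings; we mirror it with this sum type.
inductive Tok where
  | num : Int → Tok
  | ch  : Char → Tok
deriving DecidableEq, Repr

-- hand port of int(this_num): exact for the nonempty all-digit runs Pre_ admits
-- (Python's int() also accepts sign/whitespace/underscore forms — excluded by Pre_, see header cites).
def digitsVal (cs : List Char) : Int :=
  cs.foldl (fun a c => a * 10 + ((c.toNat : Int) - 48)) 0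

-- the first loop of A: build this_num / new_s
def tokStepA (st : List Char × List Tok) (c : Char) : List Char × List Tok :=
  if c = '-' ∨ c = '+' ∨ c = ' ' ∨ c = '(' ∨ c = ')' then
    if c = ' ' then st
    else ([], (if st.1 ≠ [] then st.2 ++ [Tok.num (digitsVal st.1)] else st.2) ++ [Tok.ch c])
  else (st.1 ++ [c], st.2)

def tokenizeA (s : String) : List Tok :=
  let st := s.toList.foldl tokStepA ([], [])
  if st.1 ≠ [] then st.2 ++ [Tok.num (digitsVal st.1)] else st.2

-- while stack[-1] != '(': eq.append(stack.pop())   (our stacks keep the TOP at the list head;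
-- the Python-order list is the reverse).  Empty stack = IndexError in Python, outside Pre_.
def popUntil : List Tok → List Tok × List Tok
  | [] => ([], [])
  | t :: rest =>
    if t = Tok.ch '(' then ([], t :: rest)
    else
      let p := popUntil rest
      (t :: p.1, p.2)

-- if eq[0] != '-': eq.insert(0, '+')   (eq[0] of [] = IndexError, outside Pre_)
def maybePlus (eq : List Tok) : List Tok :=
  if PySem.List.pyGet? eq 0 ≠ some (Tok.ch '-') then Tok.ch '+' :: eq else eq

-- eq[i+1] read as an int; Python raises (TypeError/IndexError) otherwise, outside Pre_
def getNumD : Option Tok → Int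
  | some (Tok.num n) => n
  | _ => 0

-- for i in range(0, len(eq), 2): result ± eq[i+1]
def pairLoop (eq : List Tok) : Int :=
  (PySem.List.pyRange 0 (eq.length : Int) 2).foldl
    (fun result i =>
      if PySem.List.pyGet? eq i = some (Tok.ch '+') then
        result + getNumD (PySem.List.pyGet? eq (i + 1))
      else
        result - getNumD (PySem.List.pyGet? eq (i + 1))) 0

-- the second loop of A (stack head = top)
def stackStepA (stack : List Tok) (c : Tok) : List Tok :=
  if c = Tok.ch ')' then
    let p := popUntil stack
    let eq := p.1.reverse
    Tok.num (pairLoop (maybePlus eq)) :: p.2.tail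
  else c :: stack

def calculate (s : String) : Int :=
  let newS := tokenizeA s
  let stack := newS.foldl stackStepA []
  pairLoop (maybePlus stack.reverse)

-- ===== PORT B =====

-- state: (result, sign, num, stack of (result, sign))
def bStep (st : Int × Int × Int × List (Int × Int)) (c : Char) : Int × Int × Int × List (Int × Int) :=
  let (result, sign, num, stack) := st
  if PySem.Chars.isdigit c then
    -- int(c): value of an ASCII digit (exact under the isdigit guard on Dom)
    (result, sign, num * 10 + ((c.toNat : Int) - 48), stack)
  else if c = '+' then (result + sign * num, 1, 0, stack)
  else if c = '-' then (result + sign * num, -1, 0, stack)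
  else if c = '(' then (0, 1, num, (result, sign) :: stack)
  else if c = ')' then
    match stack with
    | (prev, psign) :: rest => (prev + psign * (result + sign * num), sign, 0, rest)
    | [] => st  -- stack.pop() of [] = IndexError in Python, outside Pre_
  else if c = ' ' then st  -- spaces are skipped
  else st  -- Python raises ValueError (unexpected character) here: outside Pre_

def calculate_alt (s : String) : Int :=
  let st := s.toList.foldl bStep (0, 1, 0, [])
  st.1 + st.2.1 * st.2.2.1

-- ===== PRECONDITION & SPEC =====

-- Pre_ is the well-formed-expression DFA: q0 = expecting an atom (unary minus allowed: start or
-- after '('), q1 = after an operator, q2 = inside a number, q3 = after ')'; d = paren depth.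
inductive QS where
  | q0 | q1 | q2 | q3
deriving DecidableEq, Repr

def preStep1 (q : QS) (d : Nat) (c : Char) : Option (QS × Nat) :=
    if c = ' ' then some (q, d)
    else if c = '0' ∨ c = '1' ∨ c = '2' ∨ c = '3' ∨ c = '4' ∨ c = '5' ∨ c = '6' ∨ c = '7' ∨ c = '8' ∨ c = '9' then
      (if q = .q3 then none else some (.q2, d))
    else if c = '+' then (if q = .q2 ∨ q = .q3 then some (.q1, d) else none)
    else if c = '-' then (if q = .q1 then none else some (.q1, d))
    else if c = '(' then (if q = .q0 ∨ q = .q1 then some (.q0, d + 1) else none)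
    else if c = ')' then
      (if (q = .q2 ∨ q = .q3) ∧ d ≠ 0 then some (.q3, d - 1) else none)
    else none

def preStep : Option (QS × Nat) → Char → Option (QS × Nat)
  | none, _ => none
  | some (q, d), c => preStep1 q d c

-- Pre_ excludes (a) ill-formed/unbalanced expressions (A's leftover pair-scan then returns an
-- accidental value or raises) and (b) numerals with underscore/whitespace padding that int()
-- accepts; on well-formed expressions over digits, plus, minus, parentheses and spaces it holds.
def Pre_calculate (s : String) : Prop :=
  (match s.toList.foldl preStep (some (.q0, 0)) with
   | some (.q2, 0) => true
   | some (.q3, 0) => true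
   | _ => false) = true

instance (s : String) : Decidable (Pre_calculate s) := by unfold Pre_calculate; infer_instance

def pvWitness_calculate : String := "1 + (2-3)"

def Spec_calculate (s : String) (out : Int) : Prop := out = calculate_alt s
instance (s : String) (out : Int) : Decidable (Spec_calculate s out) := by unfold Spec_calculate; infer_instance

-- ===== CLAIM (what is proved, stated in full; the proofs are below) =====
def Claim_equal_calculate : Prop := ∀ (s : String), Dom_calculate s → Pre_calculate s → Spec_calculate s (calculate s)

-- ===== LEMMAS AND PROOFS =====

-- a completed frame awaiting its next number: FrOp f r s means the stack segment f (in Python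
-- order) evaluates, once a number n is appended, to r + s * n
inductive FrOp : List Tok → Int → Int → Prop where
  | start : FrOp [] 0 1
  | uminus : FrOp [Tok.ch '-'] 0 (-1)
  | plus {f r s} (n : Int) : FrOp f r s → FrOp (f ++ [Tok.num n, Tok.ch '+']) (r + s * n) 1
  | minus {f r s} (n : Int) : FrOp f r s → FrOp (f ++ [Tok.num n, Tok.ch '-']) (r + s * n) (-1)

def FrNum (g : List Tok) (v : Int) : Prop :=
  ∃ f r s n, FrOp f r s ∧ g = f ++ [Tok.num n] ∧ v = r + s * n

-- decomposition of A's stack below the innermost open frame, against B's (result, sign) stack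
inductive Below : List Tok → List (Int × Int) → Prop where
  | nil : Below [] []
  | cons {f r s rest bst} : FrOp f r s → Below rest bst →
      Below (Tok.ch '(' :: (f.reverse ++ rest)) ((r, s) :: bst)

-- the simulation invariant, per DFA state
def R (q : QS) (d : Nat) (tk : List Char × List Tok) (b : Int × Int × Int × List (Int × Int)) : Prop :=
  match tk, b with
  | (tn, ns), (res, sg, nm, bst) =>
    let ast := ns.foldl stackStepA []
    match q with
    | .q0 => tn = [] ∧ nm = 0 ∧ res = 0 ∧ sg = 1 ∧ Below ast bst ∧ bst.length = d
    | .q1 => tn = [] ∧ nm = 0 ∧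
        ∃ f rest, FrOp f res sg ∧ ast = f.reverse ++ rest ∧ Below rest bst ∧ bst.length = d
    | .q2 => tn ≠ [] ∧ nm = digitsVal tn ∧
        ∃ f rest, FrOp f res sg ∧ ast = f.reverse ++ rest ∧ Below rest bst ∧ bst.length = d
    | .q3 => tn = [] ∧ nm = 0 ∧
        ∃ g rest, FrNum g res ∧ ast = g.reverse ++ rest ∧ Below rest bst ∧ bst.length = d

theorem frop_no_lp {f r s} (h : FrOp f r s) : Tok.ch '(' ∉ f := by
  induction h with
  | start => simp
  | uminus => simp
  | plus n _ ih => simp_all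
  | minus n _ ih => simp_all

theorem popUntil_spec (l : List Tok) (r : List Tok) (h : Tok.ch '(' ∉ l) :
    popUntil (l ++ Tok.ch '(' :: r) = (l, Tok.ch '(' :: r) := by
  induction l with
  | nil => simp [popUntil]
  | cons t ts ih =>
    simp only [List.mem_cons, not_or] at h
    simp [popUntil, (Ne.symm h.1 : ¬ t = Tok.ch '('), ih h.2]

theorem pairLoop_nil : pairLoop [] = 0 := by decide

theorem pyRange2_cons (n : Nat) :
    PySem.List.pyRange 0 ((n : Int) + 2) 2 = 0 :: (PySem.List.pyRange 0 (n : Int) 2).map (· + 2) := by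
  rw [PySem.List.pyRange_of_pos 0 ((n:Int)+2) (by norm_num),
      PySem.List.pyRange_of_pos 0 (n:Int) (by norm_num)]
  have h1 : (0:Int) < (n:Int) + 2 := by positivity
  rw [if_pos h1]
  have hk : (((n:Int) + 2 - 0 + 2 - 1) / 2).toNat =
      (if (0:Int) < n then (((n:Int) - 0 + 2 - 1) / 2).toNat else 0) + 1 := by
    split_ifs with h <;> omega
  rw [hk, List.range_succ_eq_map, List.map_cons, List.map_map, List.map_map]
  refine congrArg (List.cons _) ?_
  apply List.map_congr_left
  intro j hj
  simp [Function.comp_def]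
  push_cast
  ring


theorem pairLoop_eq_sum (eq : List Tok) :
    pairLoop eq = ((PySem.List.pyRange 0 (eq.length : Int) 2).map
      (fun i => if PySem.List.pyGet? eq i = some (Tok.ch '+') then
          getNumD (PySem.List.pyGet? eq (i + 1)) else -(getNumD (PySem.List.pyGet? eq (i + 1))))).sum := by
  unfold pairLoop
  rw [PySem.List.foldl_congr_mem _ _
    (fun result i => result + (if PySem.List.pyGet? eq i = some (Tok.ch '+') then
        getNumD (PySem.List.pyGet? eq (i + 1)) else -(getNumD (PySem.List.pyGet? eq (i + 1))))) _
    (by intro acc x hx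
        by_cases h : PySem.List.pyGet? eq x = some (Tok.ch '+') <;> simp [h] <;> ring)]
  rw [PySem.List.foldl_add]
  ring


theorem shift2 (t1 t2 : Tok) (rest : List Tok) (i : Int) (h : 0 ≤ i) :
    PySem.List.pyGet? (t1 :: t2 :: rest) (i + 2) = PySem.List.pyGet? rest i := by
  obtain ⟨n, rfl⟩ := Int.eq_ofNat_of_zero_le h
  have h1 : (n : Int) + 2 = ((n + 1 : Nat) : Int) + 1 := by push_cast; ring
  rw [h1, PySem.List.pyGet?_cons_succ]
  have h2 : ((n + 1 : Nat) : Int) = (n : Int) + 1 := by push_cast; ring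
  rw [h2, PySem.List.pyGet?_cons_succ]


theorem pairLoop_cons2 (t1 t2 : Tok) (rest : List Tok) :
    pairLoop (t1 :: t2 :: rest) =
      (if t1 = Tok.ch '+' then getNumD (some t2) else -(getNumD (some t2))) + pairLoop rest := by
  rw [pairLoop_eq_sum, pairLoop_eq_sum]
  have hlen : ((t1 :: t2 :: rest).length : Int) = (rest.length : Int) + 2 := by simp; ring
  rw [hlen, pyRange2_cons, List.map_cons, List.sum_cons, List.map_map]
  have h0 : PySem.List.pyGet? (t1 :: t2 :: rest) 0 = some t1 := PySem.List.pyGet?_zero_cons ..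
  have h01 : PySem.List.pyGet? (t1 :: t2 :: rest) (0 + 1) = some t2 := by
    have : (0 : Int) + 1 = ((0 : Nat) : Int) + 1 := by norm_num
    rw [this, PySem.List.pyGet?_cons_succ]
    exact PySem.List.pyGet?_zero_cons ..
  rw [h0, h01]
  congr 1
  · by_cases h : t1 = Tok.ch '+' <;> simp [h]
  · apply congrArg List.sum
    apply List.map_congr_left
    intro i hi
    have hpos := (PySem.List.mem_pyRange_iff_of_pos (by norm_num) i).mp hi
    simp only [Function.comp_def]
    rw [shift2 _ _ _ _ hpos.1]
    have : i + 2 + 1 = (i + 1) + 2 := by ring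
    rw [this, shift2 _ _ _ _ (by omega)]


theorem maybePlus_append (l x : List Tok) (h : l ≠ []) :
    maybePlus (l ++ x) = maybePlus l ++ x := by
  cases l with
  | nil => simp at h
  | cons y l' => by_cases hy : y = Tok.ch '-' <;>
      simp [maybePlus, PySem.List.pyGet?_zero_cons, hy]


theorem frop_eval {f r s} (h : FrOp f r s) :
    ∀ (n : Int) (rest : List Tok),
      pairLoop (maybePlus (f ++ [Tok.num n]) ++ rest) = r + s * n + pairLoop rest := by
  induction h with
  | start =>
    intro n rest
    have : maybePlus ([] ++ [Tok.num n]) = [Tok.ch '+', Tok.num n] := by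
      simp [maybePlus, PySem.List.pyGet?_zero_cons]
    rw [this]
    simp only [List.cons_append, List.nil_append, pairLoop_cons2]
    simp [getNumD]
  | uminus =>
    intro n rest
    have : maybePlus ([Tok.ch '-'] ++ [Tok.num n]) = [Tok.ch '-', Tok.num n] := by
      simp [maybePlus, PySem.List.pyGet?_zero_cons]
    rw [this]
    simp only [List.cons_append, List.nil_append, pairLoop_cons2]
    simp [getNumD]
  | plus m hf ih =>
    intro n rest
    rename_i f' r' s'
    have hne : f' ++ [Tok.num m] ≠ [] := by simp
    have h1 : (f' ++ [Tok.num m, Tok.ch '+']) ++ [Tok.num n] =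
        (f' ++ [Tok.num m]) ++ [Tok.ch '+', Tok.num n] := by simp
    rw [h1, maybePlus_append _ _ hne, List.append_assoc]
    rw [ih m ([Tok.ch '+', Tok.num n] ++ rest)]
    simp only [List.cons_append, List.nil_append, pairLoop_cons2]
    simp [getNumD]; ring
  | minus m hf ih =>
    intro n rest
    rename_i f' r' s'
    have hne : f' ++ [Tok.num m] ≠ [] := by simp
    have h1 : (f' ++ [Tok.num m, Tok.ch '-']) ++ [Tok.num n] =
        (f' ++ [Tok.num m]) ++ [Tok.ch '-', Tok.num n] := by simp
    rw [h1, maybePlus_append _ _ hne, List.append_assoc]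
    rw [ih m ([Tok.ch '-', Tok.num n] ++ rest)]
    simp only [List.cons_append, List.nil_append, pairLoop_cons2]
    simp [getNumD]; ring

theorem frnum_eval {g v} (h : FrNum g v) : pairLoop (maybePlus g) = v := by
  obtain ⟨f, r, s, n, hf, rfl, rfl⟩ := h
  have := frop_eval hf n []
  simpa [pairLoop_nil] using this

theorem digitsVal_append (tn : List Char) (c : Char) :
    digitsVal (tn ++ [c]) = digitsVal tn * 10 + ((c.toNat : Int) - 48) := by
  simp [digitsVal]

theorem stackStepA_num (st : List Tok) (n : Int) :
    stackStepA st (Tok.num n) = Tok.num n :: st := by simp [stackStepA]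

theorem stackStepA_ch (st : List Tok) (c : Char) (h : c ≠ ')') :
    stackStepA st (Tok.ch c) = Tok.ch c :: st := by simp [stackStepA, h]


theorem stackStepA_chP (st : List Tok) : stackStepA st (Tok.ch '+') = Tok.ch '+' :: st :=
  stackStepA_ch st '+' (by decide)

theorem stackStepA_chM (st : List Tok) : stackStepA st (Tok.ch '-') = Tok.ch '-' :: st :=
  stackStepA_ch st '-' (by decide)

theorem stackStepA_chL (st : List Tok) : stackStepA st (Tok.ch '(') = Tok.ch '(' :: st :=
  stackStepA_ch st '(' (by decide)

theorem frnum_of_frop {f r s} (hf : FrOp f r s) (n : Int) : FrNum (f ++ [Tok.num n]) (r + s * n) :=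
  ⟨f, r, s, n, hf, rfl, rfl⟩

-- A's ')' step on a stack made of a complete frame over an open '(' collapses the frame to its value
theorem stackStepA_rparen {g v rest} (hg : FrNum g v) (hnolp : Tok.ch '(' ∉ g) :
    stackStepA (g.reverse ++ (Tok.ch '(' :: rest)) (Tok.ch ')') = Tok.num v :: rest := by
  have hpop := popUntil_spec g.reverse (rest) (by simpa using hnolp)
  simp [stackStepA, hpop, frnum_eval hg]

theorem frnum_no_lp {g v} (hg : FrNum g v) : Tok.ch '(' ∉ g := by
  obtain ⟨f, r, s, n, hf, rfl, rfl⟩ := hg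
  have := frop_no_lp hf
  simp_all

theorem step_sim {q : QS} {d : Nat} {q' : QS} {d' : Nat} {tk : List Char × List Tok}
    {b : Int × Int × Int × List (Int × Int)} (c : Char)
    (hinv : R q d tk b) (hstep : preStep (some (q, d)) c = some (q', d')) :
    R q' d' (tokStepA tk c) (bStep b c) := by
  obtain ⟨tn, ns⟩ := tk
  obtain ⟨res, sg, nm, bst⟩ := b
  replace hstep : preStep1 q d c = some (q', d') := hstep
  by_cases hsp : c = ' '
  · subst hsp
    have ht : tokStepA (tn, ns) ' ' = (tn, ns) := by simp [tokStepA]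
    have hb : bStep (res, sg, nm, bst) ' ' = (res, sg, nm, bst) := by
      simp [bStep, PySem.Chars.isdigit]
    rw [ht, hb]
    rw [preStep1.eq_def, if_pos rfl] at hstep
    obtain ⟨rfl, rfl⟩ := Prod.mk.injEq .. ▸ (Option.some.injEq .. ▸ hstep : (q, d) = (q', d'))
    exact hinv
  by_cases hdg : c = '0' ∨ c = '1' ∨ c = '2' ∨ c = '3' ∨ c = '4' ∨ c = '5' ∨ c = '6' ∨ c = '7' ∨ c = '8' ∨ c = '9'
  · have hnot : ¬(c = '-' ∨ c = '+' ∨ c = ' ' ∨ c = '(' ∨ c = ')') := by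
      rcases hdg with rfl|rfl|rfl|rfl|rfl|rfl|rfl|rfl|rfl|rfl <;> decide
    have hdig : PySem.Chars.isdigit c = true := by
      rcases hdg with rfl|rfl|rfl|rfl|rfl|rfl|rfl|rfl|rfl|rfl <;> decide
    have ht : tokStepA (tn, ns) c = (tn ++ [c], ns) := by simp [tokStepA, hnot]
    have hb : bStep (res, sg, nm, bst) c = (res, sg, nm * 10 + ((c.toNat : Int) - 48), bst) := by
      simp [bStep, hdig]
    rw [ht, hb]
    rw [preStep1.eq_def, if_neg hsp, if_pos hdg] at hstep
    cases q with
    | q3 => simp at hstep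
    | q0 =>
      obtain ⟨rfl, rfl⟩ := by simpa using hstep
      obtain ⟨h1, h2, h3, h4, h5, h6⟩ := hinv
      subst h1
      refine ⟨by simp, ?_, [], _, by rw [h3, h4]; exact FrOp.start, by simp, h5, h6⟩
      simp [h2, digitsVal]
    | q1 =>
      obtain ⟨rfl, rfl⟩ := by simpa using hstep
      obtain ⟨h1, h2, f, rest, hf, ha, hb2, hl⟩ := hinv
      subst h1
      exact ⟨by simp, by simp [h2, digitsVal], f, rest, hf, ha, hb2, hl⟩
    | q2 =>
      obtain ⟨rfl, rfl⟩ := by simpa using hstep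
      obtain ⟨h1, h2, f, rest, hf, ha, hb2, hl⟩ := hinv
      exact ⟨by simp, by rw [digitsVal_append, h2], f, rest, hf, ha, hb2, hl⟩
  by_cases hpl : c = '+'
  · subst hpl
    have hb : bStep (res, sg, nm, bst) '+' = (res + sg * nm, 1, 0, bst) := by
      simp [bStep, PySem.Chars.isdigit]
    rw [hb]
    rw [preStep1.eq_def, if_neg hsp, if_neg hdg, if_pos rfl] at hstep
    cases q with
    | q0 => simp at hstep
    | q1 => simp at hstep
    | q2 =>
      obtain ⟨rfl, rfl⟩ := by simpa using hstep
      obtain ⟨h1, h2, f, rest, hf, ha, hb2, hl⟩ := hinv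
      have ht : tokStepA (tn, ns) '+' =
          ([], ns ++ [Tok.num (digitsVal tn), Tok.ch '+']) := by
        simp [tokStepA, h1]
      rw [ht]
      refine ⟨rfl, rfl, f ++ [Tok.num (digitsVal tn), Tok.ch '+'], rest, ?_, ?_, hb2, hl⟩
      · rw [← h2]; exact FrOp.plus nm hf
      · simp [List.foldl_append, ha,
          stackStepA_num, stackStepA_chP]
    | q3 =>
      obtain ⟨rfl, rfl⟩ := by simpa using hstep
      obtain ⟨h1, h2, g, rest, hg, ha, hb2, hl⟩ := hinv
      subst h1
      have ht : tokStepA ([], ns) '+' = ([], ns ++ [Tok.ch '+']) := by simp [tokStepA]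
      rw [ht]
      obtain ⟨f0, r0, s0, n0, hf0, rfl, rfl⟩ := hg
      refine ⟨rfl, rfl, (f0 ++ [Tok.num n0]) ++ [Tok.ch '+'], rest, ?_, ?_, hb2, hl⟩
      · have : (f0 ++ [Tok.num n0]) ++ [Tok.ch '+'] = f0 ++ [Tok.num n0, Tok.ch '+'] := by simp
        rw [this, h2]
        simpa using FrOp.plus n0 hf0
      · simp [List.foldl_append, ha, stackStepA_num, stackStepA_chP]
  by_cases hmi : c = '-'
  · subst hmi
    have hb : bStep (res, sg, nm, bst) '-' = (res + sg * nm, -1, 0, bst) := by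
      simp [bStep, PySem.Chars.isdigit]
    rw [hb]
    rw [preStep1.eq_def, if_neg hsp, if_neg hdg, if_neg hpl, if_pos rfl] at hstep
    cases q with
    | q1 => simp at hstep
    | q0 =>
      obtain ⟨rfl, rfl⟩ := by simpa using hstep
      obtain ⟨h1, h2, h3, h4, h5, h6⟩ := hinv
      subst h1
      have ht : tokStepA ([], ns) '-' = ([], ns ++ [Tok.ch '-']) := by simp [tokStepA]
      rw [ht]
      refine ⟨rfl, rfl, [Tok.ch '-'], _, ?_, ?_, h5, h6⟩
      · rw [h2, h3, h4]; simpa using FrOp.uminus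
      · simp [List.foldl_append, stackStepA_num, stackStepA_chM]
    | q2 =>
      obtain ⟨rfl, rfl⟩ := by simpa using hstep
      obtain ⟨h1, h2, f, rest, hf, ha, hb2, hl⟩ := hinv
      have ht : tokStepA (tn, ns) '-' =
          ([], ns ++ [Tok.num (digitsVal tn), Tok.ch '-']) := by
        simp [tokStepA, h1]
      rw [ht]
      refine ⟨rfl, rfl, f ++ [Tok.num (digitsVal tn), Tok.ch '-'], rest, ?_, ?_, hb2, hl⟩
      · rw [← h2]; exact FrOp.minus nm hf
      · simp [List.foldl_append, ha,
          stackStepA_num, stackStepA_chM]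
    | q3 =>
      obtain ⟨rfl, rfl⟩ := by simpa using hstep
      obtain ⟨h1, h2, g, rest, hg, ha, hb2, hl⟩ := hinv
      subst h1
      have ht : tokStepA ([], ns) '-' = ([], ns ++ [Tok.ch '-']) := by simp [tokStepA]
      rw [ht]
      obtain ⟨f0, r0, s0, n0, hf0, rfl, rfl⟩ := hg
      refine ⟨rfl, rfl, (f0 ++ [Tok.num n0]) ++ [Tok.ch '-'], rest, ?_, ?_, hb2, hl⟩
      · have : (f0 ++ [Tok.num n0]) ++ [Tok.ch '-'] = f0 ++ [Tok.num n0, Tok.ch '-'] := by simp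
        rw [this, h2]
        simpa using FrOp.minus n0 hf0
      · simp [List.foldl_append, ha, stackStepA_num, stackStepA_chM]
  by_cases hlp : c = '('
  · subst hlp
    have hb : bStep (res, sg, nm, bst) '(' = (0, 1, nm, (res, sg) :: bst) := by
      simp [bStep, PySem.Chars.isdigit]
    rw [hb]
    rw [preStep1.eq_def, if_neg hsp, if_neg hdg, if_neg hpl, if_neg hmi, if_pos rfl] at hstep
    cases q with
    | q2 => simp at hstep
    | q3 => simp at hstep
    | q0 =>
      obtain ⟨rfl, rfl⟩ := by simpa using hstep
      obtain ⟨h1, h2, h3, h4, h5, h6⟩ := hinv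
      subst h1
      have ht : tokStepA ([], ns) '(' = ([], ns ++ [Tok.ch '(']) := by simp [tokStepA]
      rw [ht]
      refine ⟨rfl, h2, rfl, rfl, ?_, by simp [h6]⟩
      have hB : Below (Tok.ch '(' :: ([].reverse ++ (ns.foldl stackStepA []))) ((0, 1) :: bst) :=
        Below.cons FrOp.start h5
      rw [h3, h4]
      simpa [List.foldl_append, stackStepA_num, stackStepA_chM] using hB
    | q1 =>
      obtain ⟨rfl, rfl⟩ := by simpa using hstep
      obtain ⟨h1, h2, f, rest, hf, ha, hb2, hl⟩ := hinv
      subst h1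
      have ht : tokStepA ([], ns) '(' = ([], ns ++ [Tok.ch '(']) := by simp [tokStepA]
      rw [ht]
      refine ⟨rfl, h2, rfl, rfl, ?_, by simp [hl]⟩
      have hB : Below (Tok.ch '(' :: (f.reverse ++ rest)) ((res, sg) :: bst) :=
        Below.cons hf hb2
      simpa [List.foldl_append, ha, stackStepA_num, stackStepA_chL] using hB
  by_cases hrp : c = ')'
  · subst hrp
    rw [preStep1.eq_def, if_neg hsp, if_neg hdg, if_neg hpl, if_neg hmi, if_neg hlp, if_pos rfl] at hstep
    cases q with
    | q0 => simp at hstep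
    | q1 => simp at hstep
    | q2 =>
      cases d with
      | zero => simp at hstep
      | succ d0 =>
        obtain ⟨rfl, rfl⟩ := by simpa using hstep
        obtain ⟨h1, h2, f, rest, hf, ha, hb2, hl⟩ := hinv
        cases hb2 with
        | nil => simp at hl
        | cons hf2 hb3 =>
          rename_i f2 r2 s2 rest2 bst2
          have hb : bStep (res, sg, nm, (r2, s2) :: bst2) ')' =
              (r2 + s2 * (res + sg * nm), sg, 0, bst2) := by
            simp [bStep, PySem.Chars.isdigit]
          rw [hb]
          have ht : tokStepA (tn, ns) ')' =
              ([], ns ++ [Tok.num (digitsVal tn), Tok.ch ')']) := by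
            simp [tokStepA, h1]
          rw [ht]
          have hg : FrNum (f ++ [Tok.num nm]) (res + sg * nm) := frnum_of_frop hf nm
          refine ⟨rfl, rfl, f2 ++ [Tok.num (res + sg * nm)], rest2,
            frnum_of_frop hf2 (res + sg * nm), ?_, hb3, by simpa using hl⟩
          have hshape : stackStepA (stackStepA (ns.foldl stackStepA []) (Tok.num (digitsVal tn))) (Tok.ch ')')
              = Tok.num (res + sg * nm) :: (f2.reverse ++ rest2) := by
            rw [stackStepA_num, ha, ← h2]
            have he : Tok.num nm :: (f.reverse ++ (Tok.ch '(' :: (f2.reverse ++ rest2)))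
                = (f ++ [Tok.num nm]).reverse ++ (Tok.ch '(' :: (f2.reverse ++ rest2)) := by
              simp
            rw [he]
            exact stackStepA_rparen hg (frnum_no_lp hg)
          simp [List.foldl_append, hshape]
    | q3 =>
      cases d with
      | zero => simp at hstep
      | succ d0 =>
        obtain ⟨rfl, rfl⟩ := by simpa using hstep
        obtain ⟨h1, h2, g, rest, hg, ha, hb2, hl⟩ := hinv
        subst h1
        cases hb2 with
        | nil => simp at hl
        | cons hf2 hb3 =>
          rename_i f2 r2 s2 rest2 bst2
          have hb : bStep (res, sg, nm, (r2, s2) :: bst2) ')' =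
              (r2 + s2 * (res + sg * nm), sg, 0, bst2) := by
            simp [bStep, PySem.Chars.isdigit]
          rw [hb]
          have ht : tokStepA ([], ns) ')' = ([], ns ++ [Tok.ch ')']) := by simp [tokStepA]
          rw [ht]
          refine ⟨rfl, rfl, f2 ++ [Tok.num (res + sg * nm)], rest2, ?_, ?_, hb3,
            by simpa using hl⟩
          · exact frnum_of_frop hf2 _
          · have hshape : stackStepA (ns.foldl stackStepA []) (Tok.ch ')')
                = Tok.num res :: (f2.reverse ++ rest2) := by
              rw [ha]
              exact stackStepA_rparen hg (frnum_no_lp hg)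
            simp [List.foldl_append, hshape, h2]
  · rw [preStep1.eq_def, if_neg hsp, if_neg hdg, if_neg hpl, if_neg hmi, if_neg hlp, if_neg hrp] at hstep
    simp at hstep

theorem run_sim (cs : List Char) :
    ∀ q d q' d' tk b, R q d tk b →
      cs.foldl preStep (some (q, d)) = some (q', d') →
      R q' d' (cs.foldl tokStepA tk) (cs.foldl bStep b) := by
  induction cs with
  | nil =>
    intro q d q' d' tk b hinv hrun
    simp at hrun
    obtain ⟨rfl, rfl⟩ := hrun
    exact hinv
  | cons c cs ih =>
    intro q d q' d' tk b hinv hrun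
    simp only [List.foldl_cons] at hrun ⊢
    rcases h1 : preStep (some (q, d)) c with _ | ⟨qa, da⟩
    · rw [h1] at hrun
      have : ∀ (l : List Char), l.foldl preStep none = none := by
        intro l; induction l with
        | nil => rfl
        | cons x xs ih2 => simpa only [List.foldl_cons, preStep] using ih2
      simp [this] at hrun
    · rw [h1] at hrun
      exact ih qa da q' d' _ _ (step_sim c hinv h1) hrun

theorem below_nil_of_len_zero {rest : List Tok} {bst : List (Int × Int)}
    (h : Below rest bst) (hl : bst.length = 0) : rest = [] := by
  cases h with
  | nil => rfl
  | cons hf hb => simp at hl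

-- ===== VERDICT (by name: the statement is the Claim_ definition above) =====
theorem calculate_spec : Claim_equal_calculate := by
  unfold Claim_equal_calculate
  intro s _ hpre
  unfold Spec_calculate
  unfold Pre_calculate at hpre
  rcases hfold : s.toList.foldl preStep (some (QS.q0, 0)) with _ | ⟨q', d'⟩
  · rw [hfold] at hpre; simp at hpre
  · rw [hfold] at hpre
    rcases hA : s.toList.foldl tokStepA ([], []) with ⟨tn, ns⟩
    rcases hB : s.toList.foldl bStep (0, 1, 0, ([] : List (Int × Int))) with ⟨res, sg, nm, bst⟩
    have hR := run_sim s.toList QS.q0 0 q' d' ([], []) (0, 1, 0, [])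
      ⟨rfl, rfl, rfl, rfl, Below.nil, rfl⟩ hfold
    rw [hA, hB] at hR
    have halt : calculate_alt s = res + sg * nm := by
      simp only [calculate_alt, hB]
    cases q' with
    | q0 => cases d' <;> simp at hpre
    | q1 => cases d' <;> simp at hpre
    | q2 =>
      cases d' with
      | succ _ => simp at hpre
      | zero =>
        obtain ⟨h1, h2, f, rest, hf, ha, hb2, hl⟩ := hR
        have hrest := below_nil_of_len_zero hb2 hl
        subst hrest
        have hstack : (tokenizeA s).foldl stackStepA [] = Tok.num (digitsVal tn) :: f.reverse := by
          simp only [tokenizeA, hA]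
          rw [if_pos h1]
          rw [List.foldl_append, ha]
          simp [stackStepA_num]
        have : calculate s = pairLoop (maybePlus (f ++ [Tok.num (digitsVal tn)])) := by
          simp [calculate, hstack]
        rw [this, halt, h2]
        simpa [pairLoop_nil] using frop_eval hf (digitsVal tn) []
    | q3 =>
      cases d' with
      | succ _ => simp at hpre
      | zero =>
        obtain ⟨h1, h2, g, rest, hg, ha, hb2, hl⟩ := hR
        have hrest := below_nil_of_len_zero hb2 hl
        subst hrest
        have hstack : (tokenizeA s).foldl stackStepA [] = g.reverse := by
          simp only [tokenizeA, hA]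
          rw [if_neg (by simp [h1]), ha]
          simp
        have : calculate s = pairLoop (maybePlus g) := by
          simp [calculate, hstack]
        rw [this, halt, h2, frnum_eval hg]
        ring
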